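-- pv_equiv track=rewrite | github.com/WillLiang713/Prism | ai/compat/grok2api_stream_adapter.py | _suffix_prefix
-- ===== SOURCE A (Python) =====
-- def _suffix_prefix(text: str, tag: str) -> int:
--     if not text or not tag:
--         return 0
--     max_keep = min(len(text), len(tag) - 1)
--     for keep in range(max_keep, 0, -1):
--         if text.endswith(tag[:keep]):
--             return keep
--     return 0
-- ===== SOURCE B (Python) =====
-- def _suffix_prefix(text: str, tag: str) -> int:
--     if not text or not tag:
--         return 0
--     m = min(len(text), len(tag) - 1)
--     # one forward pass over the last m characters, maintaining the descending
--     # list of all current match lengths k (tag[:k] is a suffix of what was read)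
--     active = []
--     for c in text[len(text) - m:]:
--         nxt = [k + 1 for k in active if tag[k] == c]
--         if tag[0] == c:
--             nxt.append(1)
--         active = nxt
--     return active[0] if active else 0
-- ===== Notes on version B (the rewrite author's own statement) =====
-- stated objective: alternative
-- what changed: Replaced A's descending scan that re-checks text.endswith(tag[:keep]) for every candidate length by a single forward pass over the last max_keep characters maintaining the descending list of all currently-matching prefix lengths, returning its head.
import Mathlib
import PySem

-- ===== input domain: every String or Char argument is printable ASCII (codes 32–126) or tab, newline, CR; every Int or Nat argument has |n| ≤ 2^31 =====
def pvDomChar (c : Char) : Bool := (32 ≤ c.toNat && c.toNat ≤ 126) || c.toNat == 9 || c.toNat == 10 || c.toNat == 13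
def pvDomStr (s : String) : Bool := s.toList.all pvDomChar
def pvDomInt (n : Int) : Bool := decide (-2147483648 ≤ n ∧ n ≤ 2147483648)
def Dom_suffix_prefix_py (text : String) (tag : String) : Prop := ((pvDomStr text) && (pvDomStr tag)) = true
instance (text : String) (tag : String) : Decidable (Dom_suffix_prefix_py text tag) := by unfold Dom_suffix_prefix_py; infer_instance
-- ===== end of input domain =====

-- B replaces A's descending endswith scan by ONE forward pass over the last max_keep
-- characters that maintains the descending list of all current match lengths (objective: alternative).

-- ===== PORT A =====
-- the for-loop with early return, over range(max_keep, 0, -1)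
def pvALoop (text : String) (tag : String) : List Int → Int
  | [] => 0
  | keep :: rest =>
      if PySem.Str.endswith text (PySem.Str.slice tag none (some keep)) then keep
      else pvALoop text tag rest

def suffix_prefix_py (text : String) (tag : String) : Int :=
  if text = "" ∨ tag = "" then 0
  else
    let maxKeep : Int := min (PySem.Str.len text) (PySem.Str.len tag - 1)
    pvALoop text tag (PySem.List.pyRange maxKeep 0 (-1))

-- ===== PORT B =====
-- one step of B's loop body: advance every active match length, maybe start a new one
def pvStep (g : List Char) (acc : List Nat) (c : Char) : List Nat :=
  let nxt := (acc.filter (fun k => g[k]? == some c)).map (· + 1)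
  if g[0]? == some c then nxt ++ [1] else nxt

def suffix_prefix_py_alt (text : String) (tag : String) : Int :=
  if text = "" ∨ tag = "" then 0
  else
    let t := text.toList
    let g := tag.toList
    let m := min t.length (g.length - 1)
    let active := (t.drop (t.length - m)).foldl (pvStep g) []
    match active with
    | [] => 0
    | k :: _ => (k : Int)

-- ===== PRECONDITION & SPEC =====
def Spec_suffix_prefix_py (text : String) (tag : String) (out : Int) : Prop := out = suffix_prefix_py_alt text tag
instance (text : String) (tag : String) (out : Int) : Decidable (Spec_suffix_prefix_py text tag out) := by unfold Spec_suffix_prefix_py; infer_instance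

-- ===== CLAIM (what is proved, stated in full; the proofs are below) =====
def Claim_equal_suffix_prefix_py : Prop := ∀ (text : String) (tag : String), Dom_suffix_prefix_py text tag → Spec_suffix_prefix_py text tag (suffix_prefix_py text tag)

-- ===== LEMMAS AND PROOFS =====

-- a nonempty suffix of p ++ [c] ends in c, and what precedes it is a suffix of p
theorem pv_suffix_concat_iff {α : Type} (l p : List α) (c : α) :
    l <:+ p ++ [c] ↔ l = [] ∨ ∃ l', l = l' ++ [c] ∧ l' <:+ p := by
  constructor
  · rintro ⟨u, hu⟩
    rcases List.eq_nil_or_concat l with rfl | ⟨l', a, rfl⟩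
    · exact Or.inl rfl
    · right
      simp only [List.concat_eq_append, ← List.append_assoc] at hu
      have h := List.append_inj' hu (by simp)
      have hac : a = c := by simpa using h.2
      exact ⟨l', by simp [List.concat_eq_append, hac], ⟨u, h.1⟩⟩
  · rintro (rfl | ⟨l', rfl, u, hu⟩)
    · exact List.nil_suffix
    · exact ⟨u, by rw [← List.append_assoc, hu]⟩

theorem pv_mem_step (g : List Char) (acc : List Nat) (c : Char) (j : Nat) :
    j ∈ pvStep g acc c ↔
      (∃ k ∈ acc, g[k]? = some c ∧ j = k + 1) ∨ (g[0]? = some c ∧ j = 1) := by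
  unfold pvStep
  split_ifs with h
  · simp only [beq_iff_eq] at h
    simp only [List.mem_append, List.mem_map, List.mem_filter, List.mem_singleton, beq_iff_eq]
    constructor
    · rintro (⟨k, ⟨hk, hgk⟩, rfl⟩ | rfl)
      · exact Or.inl ⟨k, hk, hgk, rfl⟩
      · exact Or.inr ⟨h, rfl⟩
    · rintro (⟨k, hk, hgk, rfl⟩ | ⟨_, rfl⟩)
      · exact Or.inl ⟨k, ⟨hk, hgk⟩, rfl⟩
      · exact Or.inr rfl
  · simp only [beq_iff_eq] at h
    simp only [List.mem_map, List.mem_filter, beq_iff_eq]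
    constructor
    · rintro ⟨k, ⟨hk, hgk⟩, rfl⟩; exact Or.inl ⟨k, hk, hgk, rfl⟩
    · rintro (⟨k, hk, hgk, rfl⟩ | ⟨h0, _⟩)
      · exact ⟨k, ⟨hk, hgk⟩, rfl⟩
      · exact absurd h0 h

-- the invariant: after processing p, acc lists exactly the k with tag.take k a suffix of p,
-- in strictly descending order
def pvInv (g : List Char) (p : List Char) (acc : List Nat) : Prop :=
  List.Pairwise (· > ·) acc ∧ ∀ k, k ∈ acc ↔ 1 ≤ k ∧ k ≤ p.length ∧ g.take k <:+ p

theorem pv_step_inv (g p : List Char) (acc : List Nat) (c : Char)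
    (hlen : p.length < g.length) (hinv : pvInv g p acc) :
    pvInv g (p ++ [c]) (pvStep g acc c) := by
  obtain ⟨hsort, hmem⟩ := hinv
  have hbound : ∀ k ∈ acc, k ≤ p.length := fun k hk => ((hmem k).1 hk).2.1
  constructor
  · -- sortedness
    unfold pvStep
    have hnxt : List.Pairwise (· > ·) ((acc.filter (fun k => g[k]? == some c)).map (· + 1)) := by
      rw [List.pairwise_map]
      exact (hsort.filter _).imp (fun h => by omega)
    split_ifs with h
    · rw [List.pairwise_append]
      refine ⟨hnxt, List.pairwise_singleton _ _, ?_⟩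
      intro a ha b hb
      simp only [List.mem_map, List.mem_filter] at ha
      obtain ⟨k, ⟨hk, _⟩, rfl⟩ := ha
      have := ((hmem k).1 hk).1
      simp only [List.mem_singleton] at hb
      omega
    · exact hnxt
  · intro j
    rw [pv_mem_step]
    constructor
    · rintro (⟨k, hk, hgk, rfl⟩ | ⟨h0, rfl⟩)
      · obtain ⟨hk1, hkp, hks⟩ := (hmem k).1 hk
        refine ⟨by omega, by simp; omega, ?_⟩
        have : g.take (k + 1) = g.take k ++ [c] := by
          rw [List.take_succ, hgk]; rfl
        rw [this]
        exact (pv_suffix_concat_iff _ _ _).2 (Or.inr ⟨g.take k, rfl, hks⟩)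
      · refine ⟨le_refl 1, by simp, ?_⟩
        have hg : g.take 1 = [c] := by
          rcases g with _ | ⟨x, gs⟩
          · simp at h0
          · simp at h0; simp [h0]
        rw [hg]
        exact ⟨p, rfl⟩
    · rintro ⟨hj1, hjp, hjs⟩
      obtain ⟨k, rfl⟩ : ∃ k, j = k + 1 := ⟨j - 1, by omega⟩
      have hklt : k < g.length := by simp at hjp; omega
      obtain ⟨gk, hgk⟩ : ∃ x, g[k]? = some x := ⟨g[k], List.getElem?_eq_getElem hklt⟩
      have htake : g.take (k + 1) = g.take k ++ [gk] := by
        rw [List.take_succ, hgk]; rfl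
      rw [htake] at hjs
      rcases (pv_suffix_concat_iff _ _ _).1 hjs with hnil | ⟨l', heq, hsuf⟩
      · simp at hnil
      · have hinj := List.append_inj' heq (by simp)
        have hgc : gk = c := by simpa using hinj.2
        have hgt : g.take k = l' := hinj.1
        rcases Nat.eq_zero_or_pos k with rfl | hkpos
        · exact Or.inr ⟨by rw [hgk, hgc], rfl⟩
        · refine Or.inl ⟨k, ?_, by rw [hgk, hgc], rfl⟩
          refine (hmem k).2 ⟨hkpos, ?_, by rw [hgt]; exact hsuf⟩
          simp at hjp; omega

theorem pv_fold_inv (g : List Char) :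
    ∀ (rest p : List Char) (acc : List Nat),
      p.length + rest.length < g.length → pvInv g p acc →
      pvInv g (p ++ rest) (rest.foldl (pvStep g) acc) := by
  intro rest
  induction rest with
  | nil => intro p acc _ h; simpa using h
  | cons c cs ih =>
      intro p acc hlen hinv
      have h1 : pvInv g (p ++ [c]) (pvStep g acc c) :=
        pv_step_inv g p acc c (by simp at hlen ⊢; omega) hinv
      have h2 := ih (p ++ [c]) (pvStep g acc c) (by simp at hlen ⊢; omega) h1
      simpa [List.foldl_cons, List.append_assoc] using h2

-- the predicate A's loop tests, reduced to lists
theorem pv_pred_iff (text tag : String) (k : Nat) :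
    PySem.Str.endswith text (PySem.Str.slice tag none (some (k : Int))) = true ↔
      tag.toList.take k <:+ text.toList := by
  rw [show PySem.Str.endswith text (PySem.Str.slice tag none (some (k : Int)))
        = PySem.Chars.endswith text.toList (PySem.Chars.slice tag.toList none (some (k : Int))) by
      simp]
  rw [PySem.Chars.endswith_iff]
  rw [show PySem.Chars.slice tag.toList none (some (k : Int)) = tag.toList.take k by
      simp [PySem.Chars.slice_eq_listSlice, PySem.List.slice_to_natCast]]

-- descending scan of A: no hit in (0, i] ⇒ 0
theorem pv_aloop_none (text tag : String) (i : Nat)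
    (h : ∀ k : Nat, 1 ≤ k → k ≤ i →
        ¬ PySem.Str.endswith text (PySem.Str.slice tag none (some (k : Int))) = true) :
    pvALoop text tag (PySem.List.pyRange (i : Int) 0 (-1)) = 0 := by
  induction i with
  | zero => rw [PySem.List.pyRange_neg_one_eq_nil (by omega)]; rfl
  | succ n ih =>
      rw [PySem.List.pyRange_neg_one_cons (by push_cast; omega)]
      unfold pvALoop
      rw [if_neg]
      · have : ((n : Int) + 1) - 1 = (n : Int) := by omega
        rw [show ((n + 1 : Nat) : Int) - 1 = (n : Int) by push_cast; omega]
        exact ih (fun k h1 h2 => h k h1 (by omega))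
      · exact h (n + 1) (by omega) (le_refl _)

-- descending scan of A: first (= greatest) hit k0 in (0, i]
theorem pv_aloop_hit (text tag : String) (i k0 : Nat)
    (hk1 : 1 ≤ k0) (hki : k0 ≤ i)
    (hhit : PySem.Str.endswith text (PySem.Str.slice tag none (some (k0 : Int))) = true)
    (habove : ∀ k : Nat, k0 < k → k ≤ i →
        ¬ PySem.Str.endswith text (PySem.Str.slice tag none (some (k : Int))) = true) :
    pvALoop text tag (PySem.List.pyRange (i : Int) 0 (-1)) = (k0 : Int) := by
  induction i with
  | zero => omega
  | succ n ih =>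
      rw [PySem.List.pyRange_neg_one_cons (by push_cast; omega)]
      unfold pvALoop
      rcases Nat.lt_or_ge k0 (n + 1) with hlt | hge
      · rw [if_neg (habove (n + 1) hlt (le_refl _))]
        rw [show ((n + 1 : Nat) : Int) - 1 = (n : Int) by push_cast; omega]
        exact ih (by omega) (fun k h1 h2 => habove k h1 (by omega))
      · have : k0 = n + 1 := by omega
        subst this
        rw [if_pos hhit]

-- suffixes of t of length ≤ m are exactly the suffixes of t's last-m tail
theorem pv_suffix_tail_iff (t l : List Char) (m : Nat) (hm : m ≤ t.length)
    (hl : l.length ≤ m) : l <:+ t ↔ l <:+ t.drop (t.length - m) := by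
  constructor
  · intro h
    have heq : l = t.drop (t.length - l.length) := by
      obtain ⟨u, hu⟩ := h
      have : u.length = t.length - l.length := by
        have := congrArg List.length hu; simp at this; omega
      rw [← this, ← hu]; simp
    rw [heq, show t.length - l.length = (t.length - m) + (m - l.length) by omega,
        ← List.drop_drop]
    exact List.drop_suffix _ _
  · intro h
    exact h.trans (List.drop_suffix _ _)

theorem pv_main (text tag : String) (ht : ¬ text = "") (hg : ¬ tag = "") :
    suffix_prefix_py text tag = suffix_prefix_py_alt text tag := by
  unfold suffix_prefix_py suffix_prefix_py_alt
  rw [if_neg (by tauto), if_neg (by tauto)]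
  set t := text.toList with htdef
  set g := tag.toList with hgdef
  have htne : t ≠ [] := fun h => ht (by rwa [htdef, String.toList_eq_nil_iff] at h)
  have hgne : g ≠ [] := fun h => hg (by rwa [hgdef, String.toList_eq_nil_iff] at h)
  have htpos : 0 < t.length := List.length_pos_iff.2 htne
  have hgpos : 0 < g.length := List.length_pos_iff.2 hgne
  set m := min t.length (g.length - 1) with hmdef
  have hmt : m ≤ t.length := by omega
  have hmg : m < g.length := by omega
  have hmaxKeep : min (PySem.Str.len text) (PySem.Str.len tag - 1) = (m : Int) := by
    simp only [PySem.Str.len, ← htdef, ← hgdef]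
    omega
  rw [hmaxKeep]
  -- final invariant
  have hinv : pvInv g (([] : List Char) ++ t.drop (t.length - m))
      ((t.drop (t.length - m)).foldl (pvStep g) []) := by
    refine pv_fold_inv g (t.drop (t.length - m)) [] [] ?_ ?_
    · simp; omega
    · exact ⟨List.Pairwise.nil, by intro k; simp; omega⟩
  simp only [List.nil_append] at hinv
  obtain ⟨hsort, hmem⟩ := hinv
  have hlen_tail : (t.drop (t.length - m)).length = m := by simp; omega
  -- translate the membership characterisation to suffixes of t
  have hmem' : ∀ k : Nat, k ∈ (t.drop (t.length - m)).foldl (pvStep g) [] ↔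
      1 ≤ k ∧ k ≤ m ∧ g.take k <:+ t := by
    intro k
    rw [hmem k, hlen_tail]
    constructor
    · rintro ⟨h1, h2, h3⟩
      refine ⟨h1, h2, ?_⟩
      rw [pv_suffix_tail_iff t _ m hmt (by simp; omega)]
      exact h3
    · rintro ⟨h1, h2, h3⟩
      refine ⟨h1, h2, ?_⟩
      rw [← pv_suffix_tail_iff t _ m hmt (by simp; omega)]
      exact h3
  -- case on the final active list
  show pvALoop text tag (PySem.List.pyRange (m : Int) 0 (-1)) =
    (match (t.drop (t.length - m)).foldl (pvStep g) [] with
     | [] => 0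
     | k :: _ => (k : Int))
  cases hactive : (t.drop (t.length - m)).foldl (pvStep g) [] with
  | nil =>
      show _ = (0 : Int)
      refine pv_aloop_none text tag m ?_
      intro k h1 h2 hend
      have : g.take k <:+ t := by rw [← pv_pred_iff]; exact hend
      have := (hmem' k).2 ⟨h1, h2, this⟩
      rw [hactive] at this; simp at this
  | cons k0 rest =>
      show _ = (k0 : Int)
      have hk0 : 1 ≤ k0 ∧ k0 ≤ m ∧ g.take k0 <:+ t := by
        rw [← hmem' k0, hactive]; exact List.mem_cons_self
      refine pv_aloop_hit text tag m k0 hk0.1 hk0.2.1 ?_ ?_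
      · rw [pv_pred_iff]; exact hk0.2.2
      · intro k hk hkm hend
        have hkmem : k ∈ k0 :: rest := by
          rw [← hactive, hmem' k]
          exact ⟨by omega, hkm, by rw [← pv_pred_iff]; exact hend⟩
        rw [hactive] at hsort
        rcases List.mem_cons.1 hkmem with rfl | hkr
        · omega
        · have := (List.pairwise_cons.1 hsort).1 k hkr
          omega

-- ===== VERDICT (by name: the statement is the Claim_ definition above) =====
theorem suffix_prefix_py_spec : Claim_equal_suffix_prefix_py := by
  intro text tag _
  unfold Spec_suffix_prefix_py
  by_cases ht : text = ""
  · subst ht; by_cases hg : tag = "" <;> simp [suffix_prefix_py, suffix_prefix_py_alt]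
  · by_cases hg : tag = ""
    · subst hg; simp [suffix_prefix_py, suffix_prefix_py_alt]
    · exact pv_main text tag ht hg
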